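-- pv_equiv track=rewrite | github.com/AndreasMuehlmann/straisol | main.py | give_numbers_h
-- ===== SOURCE A (Python) =====
-- def give_numbers_h(straights, static_index, search_range):
--     numbers = []
--     numbers_in_bound = []
--     in_bound = True
--     free_squares = 0
--     for changing_index in search_range:
--         if straights[static_index][changing_index].isdigit():
--             numbers.append(int(straights[static_index][changing_index]))
--             if in_bound:
--                 numbers_in_bound.append(int(straights[static_index][changing_index]))
--
--         elif straights[static_index][changing_index] == '.':
--             in_bound = False
--             continue
--
--         elif len(straights[static_index][changing_index]) == 2:
--             numbers.append(int(straights[static_index][changing_index][1]))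
--             in_bound = False
--             continue
--
--         elif in_bound:
--             free_squares += 1
--
--     return numbers, numbers_in_bound, free_squares
-- ===== SOURCE B (Python) =====
-- def give_numbers_h(straights, static_index, search_range):
--     def cell(i):
--         return straights[static_index][i]
--
--     def is_boundary(c):
--         return not c.isdigit() and (c == '.' or len(c) == 2)
--
--     cut = len(search_range)
--     for k, i in enumerate(search_range):
--         if is_boundary(cell(i)):
--             cut = k
--             break
--     pre = [cell(i) for i in search_range[:cut]]
--     post = [cell(i) for i in search_range[cut:]]
--     nums_pre = [int(c) for c in pre if c.isdigit()]
--     free = sum(1 for c in pre if not c.isdigit())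
--     nums_post = [int(c) if c.isdigit() else int(c[1])
--                  for c in post if c.isdigit() or (c != '.' and len(c) == 2)]
--     return nums_pre + nums_post, list(nums_pre), free
-- ===== Notes on version B (the rewrite author's own statement) =====
-- stated objective: alternative
-- what changed: Replaces A's single stateful loop with an in_bound flag by first locating the boundary index (first '.' or non-digit length-2 cell), then two flag-free passes: filter/map comprehensions over the prefix (numbers, in-bound numbers, free-square count) and over the suffix (numbers only).
import Mathlib
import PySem

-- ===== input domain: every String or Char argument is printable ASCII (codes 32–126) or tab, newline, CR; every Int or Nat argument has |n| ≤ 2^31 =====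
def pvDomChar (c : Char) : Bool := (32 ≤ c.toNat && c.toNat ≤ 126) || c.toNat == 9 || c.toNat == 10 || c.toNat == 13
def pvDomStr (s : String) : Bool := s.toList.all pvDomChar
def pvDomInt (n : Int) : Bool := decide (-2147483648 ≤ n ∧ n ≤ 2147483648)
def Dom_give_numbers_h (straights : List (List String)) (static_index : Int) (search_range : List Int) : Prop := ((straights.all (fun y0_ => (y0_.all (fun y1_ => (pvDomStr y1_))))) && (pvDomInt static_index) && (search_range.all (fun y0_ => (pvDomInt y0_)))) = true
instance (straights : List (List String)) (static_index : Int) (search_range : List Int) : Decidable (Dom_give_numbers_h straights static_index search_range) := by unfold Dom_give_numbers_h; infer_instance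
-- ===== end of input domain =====

-- B replaces A's single stateful loop (in_bound flag) by boundary-index search plus two flag-free
-- filter/map passes over the prefix and the suffix; same cost, different decomposition.

-- shared primitive wrappers: the cell straights[static_index][ci], int(cell), int(cell[1])
def pvCell (straights : List (List String)) (static_index : Int) (ci : Int) : String :=
  PySem.List.pyGetD (PySem.List.pyGetD straights static_index []) ci ""
def pvIntOfCell (c : String) : Int := (PySem.Int.ofStr? c).getD 0
def pvIntOfSecond (c : String) : Int :=
  (PySem.Int.ofStr? (String.ofList [(PySem.Str.pyGet? c 1).getD ' '])).getD 0

-- ===== PORT A =====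
def give_numbers_h (straights : List (List String)) (static_index : Int) (search_range : List Int) : List Int × List Int × Int :=
  let st := search_range.foldl (fun (st : (List Int × List Int) × Bool × Int) changing_index =>
      let cell := pvCell straights static_index changing_index
      if PySem.Str.strIsdigit cell then
        ((st.1.1 ++ [pvIntOfCell cell],
          if st.2.1 then st.1.2 ++ [pvIntOfCell cell] else st.1.2), st.2.1, st.2.2)
      else if cell == "." then
        (st.1, false, st.2.2)
      else if PySem.Str.len cell == 2 then
        ((st.1.1 ++ [pvIntOfSecond cell], st.1.2), false, st.2.2)
      else if st.2.1 then
        (st.1, st.2.1, st.2.2 + 1)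
      else st)
    (([], []), true, 0)
  (st.1.1, st.1.2, st.2.2)

-- ===== PORT B =====
def pvIsBoundary (c : String) : Bool :=
  !PySem.Str.strIsdigit c && (c == "." || PySem.Str.len c == 2)

def give_numbers_h_alt (straights : List (List String)) (static_index : Int) (search_range : List Int) : List Int × List Int × Int :=
  let cut := search_range.findIdx (fun i => pvIsBoundary (pvCell straights static_index i))
  let pre := (search_range.take cut).map (pvCell straights static_index)
  let post := (search_range.drop cut).map (pvCell straights static_index)
  let numsPre := (pre.filter (fun c => PySem.Str.strIsdigit c)).map pvIntOfCell
  let free : Int := ((pre.filter (fun c => !PySem.Str.strIsdigit c)).length : Int)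
  let numsPost := (post.filter (fun c => PySem.Str.strIsdigit c || (c != "." && PySem.Str.len c == 2))).map
      (fun c => if PySem.Str.strIsdigit c then pvIntOfCell c else pvIntOfSecond c)
  (numsPre ++ numsPost, numsPre, free)

-- ===== PRECONDITION & SPEC =====
-- Pre_ excludes exactly the inputs where Python A raises: an out-of-range row/cell index
-- (IndexError) or a boundary cell of length 2 whose second character int() rejects (ValueError).
def Pre_give_numbers_h (straights : List (List String)) (static_index : Int) (search_range : List Int) : Prop :=
  ∀ ci ∈ search_range,
    PySem.Raise.InRange straights.length static_index ∧
    PySem.Raise.InRange (PySem.List.pyGetD straights static_index []).length ci ∧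
    (¬ PySem.Str.strIsdigit (pvCell straights static_index ci) = true →
     pvCell straights static_index ci ≠ "." →
     PySem.Str.len (pvCell straights static_index ci) = 2 →
     (PySem.Int.ofStr? (String.ofList [(PySem.Str.pyGet? (pvCell straights static_index ci) 1).getD ' '])).isSome = true)
instance (straights : List (List String)) (static_index : Int) (search_range : List Int) : Decidable (Pre_give_numbers_h straights static_index search_range) := by unfold Pre_give_numbers_h; infer_instance

def pvWitness_give_numbers_h : List (List String) × Int × List Int :=
  ([["1", "#", ".", "#2", "3"]], 0, [0, 1, 2, 3, 4])

def Spec_give_numbers_h (straights : List (List String)) (static_index : Int) (search_range : List Int) (out : List Int × List Int × Int) : Prop := out = give_numbers_h_alt straights static_index search_range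
instance (straights : List (List String)) (static_index : Int) (search_range : List Int) (out : List Int × List Int × Int) : Decidable (Spec_give_numbers_h straights static_index search_range out) := by unfold Spec_give_numbers_h; infer_instance

-- ===== CLAIM (what is proved, stated in full; the proofs are below) =====
def Claim_equal_give_numbers_h : Prop := ∀ (straights : List (List String)) (static_index : Int) (search_range : List Int), Dom_give_numbers_h straights static_index search_range → Pre_give_numbers_h straights static_index search_range → Spec_give_numbers_h straights static_index search_range (give_numbers_h straights static_index search_range)

-- ===== LEMMAS AND PROOFS =====

-- B's three result pieces as functions of the list of cell strings
def pvPreNums (cs : List String) : List Int :=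
  (cs.filter (fun c => PySem.Str.strIsdigit c)).map pvIntOfCell
def pvFree (cs : List String) : Int :=
  ((cs.filter (fun c => !PySem.Str.strIsdigit c)).length : Int)
def pvPostNums (cs : List String) : List Int :=
  (cs.filter (fun c => PySem.Str.strIsdigit c || (c != "." && PySem.Str.len c == 2))).map
    (fun c => if PySem.Str.strIsdigit c then pvIntOfCell c else pvIntOfSecond c)

-- A's loop step, abstracted over the cell function
def pvStepA (g : Int → String) (st : (List Int × List Int) × Bool × Int) (changing_index : Int) : (List Int × List Int) × Bool × Int :=
  let cell := g changing_index
  if PySem.Str.strIsdigit cell then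
    ((st.1.1 ++ [pvIntOfCell cell],
      if st.2.1 then st.1.2 ++ [pvIntOfCell cell] else st.1.2), st.2.1, st.2.2)
  else if cell == "." then
    (st.1, false, st.2.2)
  else if PySem.Str.len cell == 2 then
    ((st.1.1 ++ [pvIntOfSecond cell], st.1.2), false, st.2.2)
  else if st.2.1 then
    (st.1, st.2.1, st.2.2 + 1)
  else st

-- once in_bound is false, A's loop only appends pvPostNums to numbers
lemma foldA_false (g : Int → String) (l : List Int) (ns nb : List Int) (fs : Int) :
    l.foldl (pvStepA g) ((ns, nb), false, fs) = ((ns ++ pvPostNums (l.map g), nb), false, fs) := by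
  induction l generalizing ns with
  | nil => simp [pvPostNums]
  | cons i l ih =>
    simp only [List.foldl_cons, List.map_cons, pvStepA]
    by_cases hd : PySem.Chars.strIsdigit (g i).toList = true
    · simp [hd, ih, pvPostNums]
    · by_cases hdot : g i = "."
      · simp [(by decide : PySem.Chars.strIsdigit ['.'] = false), hdot, ih, pvPostNums]
      · by_cases h2 : ((g i).length : Int) = 2
        · simp [hd, hdot, h2, ih, pvPostNums]
        · simp [hd, hdot, h2, ih, pvPostNums]

-- while in_bound is true, A's loop computes B's three pieces split at the first boundary cell
lemma foldA_true (g : Int → String) (l : List Int) (ns nb : List Int) (fs : Int) :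
    l.foldl (pvStepA g) ((ns, nb), true, fs)
      = ((ns ++ pvPreNums ((l.take (l.findIdx (fun i => pvIsBoundary (g i)))).map g)
             ++ pvPostNums ((l.drop (l.findIdx (fun i => pvIsBoundary (g i)))).map g),
          nb ++ pvPreNums ((l.take (l.findIdx (fun i => pvIsBoundary (g i)))).map g)),
         !(l.any (fun i => pvIsBoundary (g i))),
         fs + pvFree ((l.take (l.findIdx (fun i => pvIsBoundary (g i)))).map g)) := by
  induction l generalizing ns nb fs with
  | nil => simp [pvPreNums, pvPostNums, pvFree]
  | cons i l ih =>
    simp only [List.foldl_cons, pvStepA, List.findIdx_cons, List.any_cons]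
    by_cases hd : PySem.Chars.strIsdigit (g i).toList = true
    · have hb : pvIsBoundary (g i) = false := by simp [pvIsBoundary, hd]
      simp only [hb, cond_false, List.take_succ_cons, List.drop_succ_cons, List.map_cons]
      simp [hd, ih, pvPreNums, pvFree]
    · by_cases hdot : g i = "."
      · have hb : pvIsBoundary (g i) = true := by simp [pvIsBoundary, (by decide : PySem.Chars.strIsdigit ['.'] = false), hdot]
        simp only [hb, cond_true, List.take_zero, List.drop_zero, List.map_nil, List.map_cons]
        simp [(by decide : PySem.Chars.strIsdigit ['.'] = false), hdot, foldA_false, pvPostNums, pvPreNums, pvFree]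
      · by_cases h2 : ((g i).length : Int) = 2
        · have hb : pvIsBoundary (g i) = true := by simp [pvIsBoundary, hd, h2]
          simp only [hb, cond_true, List.take_zero, List.drop_zero, List.map_nil, List.map_cons]
          simp [hd, hdot, h2, foldA_false, pvPostNums, pvPreNums, pvFree]
        · have hb : pvIsBoundary (g i) = false := by simp [pvIsBoundary, hd, hdot, h2]
          simp only [hb, cond_false, List.take_succ_cons, List.drop_succ_cons, List.map_cons]
          simp [hd, hdot, h2, ih, pvPreNums, pvFree]
          omega

-- ===== VERDICT (by name: the statement is the Claim_ definition above) =====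
theorem give_numbers_h_spec : Claim_equal_give_numbers_h := by
  intro straights static_index search_range _ _
  unfold Spec_give_numbers_h give_numbers_h give_numbers_h_alt
  show (let st := List.foldl (pvStepA (pvCell straights static_index)) (([], []), true, 0) search_range;
        (st.1.1, st.1.2, st.2.2)) = _
  rw [foldA_true]
  simp [pvPreNums, pvPostNums, pvFree]
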